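-- pv_equiv track=rewrite | github.com/danonbrez/Holofractal_Harmonicode | hhs_runtime/hhs_loshu_phase_embedding_v1.py | _repair_pair
-- ===== SOURCE A (Python) =====
-- from typing import Dict, Iterable, List, Sequence, Tuple
--
-- DNA_SYMBOLS: Tuple[str, str, str, str] = ("x", "y", "z", "w")
--
-- FORBIDDEN_ADJACENCIES = {("x", "z"), ("z", "x"), ("y", "w"), ("w", "y")}
--
-- def _repair_pair(left: str, right: str) -> Tuple[str, str]:
--     """Repair forbidden local adjacency while preserving complement closure."""
--
--     if (left, right) not in FORBIDDEN_ADJACENCIES: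
--         return left, right
--     # Rotate the right symbol to the next legal DNA symbol, then recompute the
--     # eventual reverse complement in xyzw_dna().
--     idx = (DNA_SYMBOLS.index(right) + 1) % len(DNA_SYMBOLS)
--     candidate = DNA_SYMBOLS[idx]
--     while (left, candidate) in FORBIDDEN_ADJACENCIES:
--         idx = (idx + 1) % len(DNA_SYMBOLS)
--         candidate = DNA_SYMBOLS[idx]
--     return left, candidate
-- ===== SOURCE B (Python) =====
-- from typing import Tuple
--
-- REPAIR = {
--     ("x", "z"): ("x", "w"),
--     ("z", "x"): ("z", "y"),
--     ("y", "w"): ("y", "x"),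
--     ("w", "y"): ("w", "z"),
-- }
--
-- def _repair_pair(left: str, right: str) -> Tuple[str, str]:
--     """Repair forbidden local adjacency via a precomputed repair table."""
--     return REPAIR.get((left, right), (left, right))
-- ===== Notes on version B (the rewrite author's own statement) =====
-- stated objective: simpler
-- what changed: Replaces the index/modulo rotation and the rotate-until-legal while loop with a precomputed four-entry repair table looked up once; non-forbidden pairs fall through unchanged.
import Mathlib
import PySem

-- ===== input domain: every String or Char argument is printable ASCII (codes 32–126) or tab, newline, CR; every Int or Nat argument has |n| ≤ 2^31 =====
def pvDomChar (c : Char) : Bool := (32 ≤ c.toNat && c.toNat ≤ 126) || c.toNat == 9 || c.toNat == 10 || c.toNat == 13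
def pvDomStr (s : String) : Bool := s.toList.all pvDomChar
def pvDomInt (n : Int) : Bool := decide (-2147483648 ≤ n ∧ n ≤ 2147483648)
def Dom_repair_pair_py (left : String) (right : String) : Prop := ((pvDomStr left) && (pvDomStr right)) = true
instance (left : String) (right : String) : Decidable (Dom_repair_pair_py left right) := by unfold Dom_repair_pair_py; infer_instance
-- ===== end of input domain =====

-- B replaces A's index/modulo rotation and rotate-until-legal while loop with a single
-- precomputed four-entry repair-table lookup (objective: simpler).

-- ===== PORT A =====
def pvDNA : List String := ["x", "y", "z", "w"]

def pvForb : PySem.Set (String × String) :=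
  PySem.Set.ofList [("x", "z"), ("z", "x"), ("y", "w"), ("w", "y")]

-- the while loop; Python's loop terminates within 4 rotations (fuel is only for totality)
def pvRepairLoop (left : String) (fuel : Nat) (idx : Nat) (candidate : String) : String :=
  match fuel with
  | 0 => candidate
  | f + 1 =>
    if PySem.Set.contains pvForb (left, candidate) then
      let idx' := (idx + 1) % pvDNA.length
      pvRepairLoop left f idx' (pvDNA.getD idx' "")
    else candidate

def repair_pair_py (left : String) (right : String) : String × String :=
  if ¬ PySem.Set.contains pvForb (left, right) then (left, right)
  else
    -- right is a DNA symbol whenever the pair is forbidden, so index? is always some; getD 0 is unreachable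
    let idx := (((PySem.List.index? pvDNA right).getD 0) + 1) % pvDNA.length
    let candidate := pvDNA.getD idx ""
    (left, pvRepairLoop left 4 idx candidate)

-- ===== PORT B =====
def pvREPAIR : PySem.Dict (String × String) (String × String) :=
  PySem.Dict.ofList
    [(("x", "z"), ("x", "w")), (("z", "x"), ("z", "y")),
     (("y", "w"), ("y", "x")), (("w", "y"), ("w", "z"))]

def repair_pair_py_alt (left : String) (right : String) : String × String :=
  PySem.Dict.getD pvREPAIR (left, right) (left, right)

-- ===== PRECONDITION & SPEC =====
def Spec_repair_pair_py (left : String) (right : String) (out : String × String) : Prop := out = repair_pair_py_alt left right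
instance (left : String) (right : String) (out : String × String) : Decidable (Spec_repair_pair_py left right out) := by unfold Spec_repair_pair_py; infer_instance

-- ===== CLAIM (what is proved, stated in full; the proofs are below) =====
def Claim_equal_repair_pair_py : Prop := ∀ (left : String) (right : String), Dom_repair_pair_py left right → Spec_repair_pair_py left right (repair_pair_py left right)

-- ===== LEMMAS AND PROOFS =====

-- ===== VERDICT (by name: the statement is the Claim_ definition above) =====
theorem repair_pair_py_spec : Claim_equal_repair_pair_py := by
  intro left right _
  unfold Spec_repair_pair_py
  by_cases h : (left, right) ∈ ([("x", "z"), ("z", "x"), ("y", "w"), ("w", "y")] : List (String × String))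
  · simp only [List.mem_cons, List.not_mem_nil, or_false] at h
    rcases h with h | h | h | h <;>
      (obtain ⟨h1, h2⟩ := Prod.mk.injEq .. ▸ h; subst h1; subst h2; decide)
  · simp only [List.mem_cons, List.not_mem_nil, or_false, not_or] at h
    obtain ⟨h1, h2, h3, h4⟩ := h
    have e1 : ("x", "z") ≠ (left, right) := fun e => h1 e.symm
    have e2 : ("z", "x") ≠ (left, right) := fun e => h2 e.symm
    have e3 : ("y", "w") ≠ (left, right) := fun e => h3 e.symm
    have e4 : ("w", "y") ≠ (left, right) := fun e => h4 e.symm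
    have hmk : pvREPAIR = PySem.Dict.mk
        [(("x", "z"), ("x", "w")), (("z", "x"), ("z", "y")),
         (("y", "w"), ("y", "x")), (("w", "y"), ("w", "z"))] := by decide
    simp [repair_pair_py, repair_pair_py_alt, hmk, PySem.Dict.getD,
      PySem.Dict.get?_mk_cons, PySem.Dict.get?, PySem.Set.contains, pvForb, PySem.Set.ofList,
      beq_iff_eq, e1, e2, e3, e4, h1, h2, h3, h4]
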